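-- pv_equiv track=rewrite | github.com/jjundol2008/stock | TodayList.py | split_codes_equally
-- ===== SOURCE A (Python) =====
-- def split_codes_equally(codes, chunks=10):
--     "Splits dict by kes. Returna a list of dictionaries"
--     # prep with empty dicts
--     return_list = [dict() for idx in range(chunks)]
--     idx = 0
--     for k,v in codes.items():
--         return_list[idx][k] = v
--         if idx < chunks-1: # indexes start at 0
--             idx += 1
--         else:
--             idx = 0
--     return return_list
-- ===== SOURCE B (Python) =====
-- def split_codes_equally(codes, chunks=10):
--     "Splits dict by keys. Returns a list of dictionaries"
--     items = list(codes.items())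
--     return [dict(items[j::chunks]) for j in range(chunks)]
-- ===== Notes on version B (the rewrite author's own statement) =====
-- stated objective: idiomatic
-- what changed: Replaces the stateful round-robin pass (a cycling index mutating one dict per item) with a per-chunk strided slice: chunk j is dict(items[j::chunks]).
import Mathlib
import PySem

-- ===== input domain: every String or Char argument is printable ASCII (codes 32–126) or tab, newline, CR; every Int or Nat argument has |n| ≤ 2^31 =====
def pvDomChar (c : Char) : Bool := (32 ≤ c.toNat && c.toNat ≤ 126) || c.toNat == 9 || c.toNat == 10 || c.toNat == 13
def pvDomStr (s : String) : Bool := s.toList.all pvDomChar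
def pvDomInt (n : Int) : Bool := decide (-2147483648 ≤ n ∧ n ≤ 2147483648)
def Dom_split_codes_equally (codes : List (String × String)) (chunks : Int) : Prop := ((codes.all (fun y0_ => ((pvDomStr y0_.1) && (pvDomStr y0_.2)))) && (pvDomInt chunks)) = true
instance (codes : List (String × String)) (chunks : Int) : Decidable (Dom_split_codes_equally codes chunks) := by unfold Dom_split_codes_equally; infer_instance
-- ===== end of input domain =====

-- B replaces A's stateful round-robin pass with per-chunk strided slices items[j::chunks] (idiomatic); equal return values on Pre_.

-- ===== PORT A =====
def split_codes_equally (codes : List (String × String)) (chunks : Int) : List (List (String × String)) :=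
  -- return_list = [dict() for idx in range(chunks)]
  let return_list : List (PySem.Dict String String) :=
    (PySem.List.pyRange 0 chunks 1).map (fun _ => PySem.Dict.empty)
  -- for k,v in codes.items(): return_list[idx][k] = v; idx cycles.
  -- idx is always 0 ≤ idx < chunks when the list is non-empty, so List.modify at idx.toNat is
  -- exact there; Python's IndexError case (chunks ≤ 0 with non-empty codes) is excluded by Pre_.
  let fin := codes.foldl
    (fun (st : List (PySem.Dict String String) × Int) kv =>
      (st.1.modify st.2.toNat (fun d => d.insert kv.1 kv.2),
       if st.2 < chunks - 1 then st.2 + 1 else (0 : Int)))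
    (return_list, (0 : Int))
  fin.1.map PySem.Dict.items

-- ===== PORT B =====
def split_codes_equally_alt (codes : List (String × String)) (chunks : Int) : List (List (String × String)) :=
  -- [dict(items[j::chunks]) for j in range(chunks)]; slice? is none only for step 0, never hit
  -- since j ranges over a non-empty range only when chunks ≥ 1.
  (PySem.List.pyRange 0 chunks 1).map (fun j =>
    (PySem.Dict.ofList ((PySem.List.slice? codes (some j) none chunks).getD [])).items)

-- ===== PRECONDITION & SPEC =====
-- Pre_ excludes exactly the inputs where A raises IndexError: chunks ≤ 0 with non-empty codes
-- (return_list is empty there, and return_list[0] fails on the first item).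
def Pre_split_codes_equally (codes : List (String × String)) (chunks : Int) : Prop :=
  codes = [] ∨ 1 ≤ chunks
instance (codes : List (String × String)) (chunks : Int) : Decidable (Pre_split_codes_equally codes chunks) := by unfold Pre_split_codes_equally; infer_instance

def pvWitness_split_codes_equally : (List (String × String)) × Int := ([("a", "1"), ("b", "2"), ("c", "3")], 2)

def Spec_split_codes_equally (codes : List (String × String)) (chunks : Int) (out : List (List (String × String))) : Prop := out = split_codes_equally_alt codes chunks
instance (codes : List (String × String)) (chunks : Int) (out : List (List (String × String))) : Decidable (Spec_split_codes_equally codes chunks out) := by unfold Spec_split_codes_equally; infer_instance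

-- ===== CLAIM (what is proved, stated in full; the proofs are below) =====
def Claim_equal_split_codes_equally : Prop := ∀ (codes : List (String × String)) (chunks : Int), Dom_split_codes_equally codes chunks → Pre_split_codes_equally codes chunks → Spec_split_codes_equally codes chunks (split_codes_equally codes chunks)


-- ===== LEMMAS AND PROOFS =====

-- elements of cs at positions j, j+n, j+2n, …
def takeStride (cs : List (String × String)) (j n : Nat) : List (String × String) :=
  match cs, j with
  | [], _ => []
  | c :: cs, 0 => c :: takeStride cs (n - 1) n
  | _ :: cs, j + 1 => takeStride cs j n

-- elements of cs landing in chunk i when the cycling index starts at idx (mod n)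
def strideFrom (cs : List (String × String)) (idx n i : Nat) : List (String × String) :=
  match cs with
  | [] => []
  | c :: cs => (if idx = i then [c] else []) ++ strideFrom cs (if idx + 1 = n then 0 else idx + 1) n i

def insAll (d : PySem.Dict String String) (ps : List (String × String)) : PySem.Dict String String :=
  ps.foldl (fun d kv => d.insert kv.1 kv.2) d

def cnt (L j n : Nat) : Nat := if j < L then (L - j + n - 1) / n else 0

theorem insAll_push (d : PySem.Dict String String) (c : String × String) (P : Prop)
    [Decidable P] (l : List (String × String)) :
    insAll d ((if P then [c] else []) ++ l) = insAll (if P then d.insert c.1 c.2 else d) l := by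
  split_ifs <;> simp [insAll]

theorem mapIdx_modify {α β : Type} (rl : List α) (i0 : Nat) (f : α → α) (g : Nat → α → β) :
    (rl.modify i0 f).mapIdx g = rl.mapIdx (fun i d => g i (if i0 = i then f d else d)) := by
  apply List.ext_getElem
  · simp
  · intro i h1 h2
    simp only [List.getElem_mapIdx, List.getElem_modify]

theorem cnt_zero_succ (L n : Nat) (hn : 1 ≤ n) : cnt (L + 1) 0 n = cnt L (n - 1) n + 1 := by
  unfold cnt
  have h1 : (L + 1 - 0 + n - 1) = L + n := by omega
  rw [h1]
  have h2 : (L + n) / n = L / n + 1 := Nat.add_div_right L hn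
  by_cases h : n - 1 < L
  · have h3 : (L - (n - 1) + n - 1) = L := by omega
    simp [h, h2, h3]
  · have h4 : L / n = 0 := Nat.div_eq_of_lt (by omega)
    simp [h, h2, h4]

theorem cnt_succ_succ (L j n : Nat) : cnt (L + 1) (j + 1) n = cnt L j n := by
  unfold cnt
  by_cases h : j < L
  · have : (L + 1 - (j + 1) + n - 1) = L - j + n - 1 := by omega
    simp [h]
  · simp [h, show ¬ (j + 1 < L + 1) by omega]

theorem filterMap_range_takeStride (xs : List (String × String)) (j n : Nat) (hn : 1 ≤ n) :
    (List.range (cnt xs.length j n)).filterMap (fun k => xs[j + n * k]?) = takeStride xs j n := by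
  induction xs generalizing j with
  | nil => simp [takeStride]
  | cons x xs ih =>
    match j with
    | 0 =>
      rw [List.length_cons, cnt_zero_succ _ _ hn, List.range_succ_eq_map]
      rw [List.filterMap_cons, List.filterMap_map]
      have h0 : (x :: xs)[0 + n * 0]? = some x := by simp
      rw [h0]
      have hfun : ∀ k : Nat, ((x :: xs)[0 + n * (k + 1)]?) = xs[(n - 1) + n * k]? := by
        intro k
        have : 0 + n * (k + 1) = ((n - 1) + n * k) + 1 := by
          have hms : n * (k + 1) = n * k + n := by ring
          omega
        rw [this, List.getElem?_cons_succ]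
      simp only [Function.comp_def, hfun]
      rw [ih (n - 1)]
      simp [takeStride]
    | j + 1 =>
      rw [List.length_cons, cnt_succ_succ]
      have hfun : ∀ k : Nat, ((x :: xs)[(j + 1) + n * k]?) = xs[j + n * k]? := by
        intro k
        have : (j + 1) + n * k = (j + n * k) + 1 := by omega
        rw [this, List.getElem?_cons_succ]
      simp only [hfun]
      rw [ih j]
      simp [takeStride]

theorem takeStride_of_le (xs : List (String × String)) (j n : Nat) (hn : 1 ≤ n)
    (h : xs.length ≤ j) : takeStride xs j n = [] := by
  rw [← filterMap_range_takeStride xs j n hn]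
  have : cnt xs.length j n = 0 := by unfold cnt; simp [show ¬ (j < xs.length) by omega]
  simp [this]

-- slice? xs j none n = the stride for 0 ≤ j, 1 ≤ n
theorem slice?_stride (xs : List (String × String)) (j chunks : Int)
    (hj : 0 ≤ j) (hc : 1 ≤ chunks) :
    PySem.List.slice? xs (some j) none chunks = some (takeStride xs j.toNat chunks.toNat) := by
  obtain ⟨n, rfl⟩ : ∃ n : Nat, chunks = (n : Int) := ⟨chunks.toNat, (Int.toNat_of_nonneg (by omega)).symm⟩
  obtain ⟨jn, rfl⟩ : ∃ m : Nat, j = (m : Int) := ⟨j.toNat, (Int.toNat_of_nonneg hj).symm⟩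
  have hn : 1 ≤ n := by exact_mod_cast hc
  unfold PySem.List.slice? PySem.List.sliceIndices
  have hns : ((n:Int) = 0) = False := by simp; omega
  have hlt : ((n:Int) < 0) = False := by simp
  simp only [hns, hlt, if_false]
  have h0 : ¬ ((jn:Int) < 0) := by omega
  have hp : (0:Int) < (n:Int) := by omega
  simp only [if_neg h0, if_pos hp]
  by_cases hjl : jn < xs.length
  · have hmin : min (jn:Int) (xs.length:Int) = (jn:Int) := by omega
    simp only [hmin]
    rw [if_pos (by omega : (jn:Int) < (xs.length:Int))]
    have hcount : (((xs.length:Int) - (jn:Int) + (n:Int) - 1) / (n:Int)).toNat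
        = cnt xs.length jn n := by
      have h1 : (xs.length:Int) - (jn:Int) + (n:Int) - 1
          = ((xs.length - jn + n - 1 : Nat) : Int) := by omega
      rw [h1, ← Int.natCast_div, Int.toNat_natCast]
      unfold cnt
      rw [if_pos hjl]
    have hidx : ∀ k : Nat, ((jn:Int) + (n:Int) * (k:Int)).toNat = jn + n * k := by
      intro k
      have : (jn:Int) + (n:Int) * (k:Int) = ((jn + n * k : Nat) : Int) := by push_cast; ring
      rw [this, Int.toNat_natCast]
    simp only [hcount, hidx, Int.toNat_natCast]
    rw [filterMap_range_takeStride xs jn n hn]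
  · have hmin : min (jn:Int) (xs.length:Int) = (xs.length:Int) := by omega
    simp only [hmin]
    rw [if_neg (by omega : ¬ (xs.length:Int) < (xs.length:Int))]
    simp only [Int.toNat_natCast]
    rw [takeStride_of_le xs jn n hn (by omega)]
    simp

-- round-robin fold invariant
theorem foldl_rr (chunks : Int) (n : Nat) (hn : chunks = (n : Int)) (h1 : 1 ≤ n) :
    ∀ (codes : List (String × String)) (rl : List (PySem.Dict String String)) (idx : Nat),
      idx < n →
      (codes.foldl
        (fun (st : List (PySem.Dict String String) × Int) kv =>
          (st.1.modify st.2.toNat (fun d => d.insert kv.1 kv.2),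
           if st.2 < chunks - 1 then st.2 + 1 else (0 : Int)))
        (rl, (idx : Int))).1
      = rl.mapIdx (fun i d => insAll d (strideFrom codes idx n i)) := by
  intro codes
  induction codes with
  | nil =>
    intro rl idx _
    simp only [List.foldl_nil, strideFrom, insAll, List.foldl_nil]
    apply List.ext_getElem <;> simp [List.getElem_mapIdx]
  | cons c cs ih =>
    intro rl idx hidx
    rw [List.foldl_cons]
    have hnext : (if (idx : Int) < chunks - 1 then (idx : Int) + 1 else (0 : Int))
        = ((if idx + 1 = n then 0 else idx + 1 : Nat) : Int) := by
      subst hn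
      split_ifs <;> omega
    have htn : ((idx : Int)).toNat = idx := Int.toNat_natCast idx
    simp only [htn, hnext]
    rw [ih (rl.modify idx (fun d => d.insert c.1 c.2))
        (if idx + 1 = n then 0 else idx + 1) (by split_ifs <;> omega)]
    rw [mapIdx_modify]
    have hfun : (fun (i : Nat) (d : PySem.Dict String String) =>
          insAll d (strideFrom (c :: cs) idx n i))
        = (fun (i : Nat) (d : PySem.Dict String String) =>
          insAll (if idx = i then d.insert c.1 c.2 else d)
            (strideFrom cs (if idx + 1 = n then 0 else idx + 1) n i)) := by
      funext i d
      rw [show strideFrom (c :: cs) idx n i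
          = (if idx = i then [c] else [])
            ++ strideFrom cs (if idx + 1 = n then 0 else idx + 1) n i from rfl]
      rw [insAll_push]
    rw [hfun]

theorem strideFrom_eq_takeStride (n : Nat) (h1 : 1 ≤ n) :
    ∀ (cs : List (String × String)) (idx i : Nat), idx < n → i < n →
      strideFrom cs idx n i
        = takeStride cs (if idx ≤ i then i - idx else i + n - idx) n := by
  intro cs
  induction cs with
  | nil => intro idx i _ _; simp [strideFrom, takeStride]
  | cons c cs ih =>
    intro idx i hidx hi
    rw [show strideFrom (c :: cs) idx n i
        = (if idx = i then [c] else []) ++ strideFrom cs (if idx + 1 = n then 0 else idx + 1) n i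
        from rfl]
    rw [ih (if idx + 1 = n then 0 else idx + 1) i (by split_ifs <;> omega) hi]
    by_cases he : idx = i
    · subst he
      simp only [if_pos (le_refl idx), Nat.sub_self]
      rw [show takeStride (c :: cs) 0 n = c :: takeStride cs (n - 1) n from rfl]
      have harg : (if (if idx + 1 = n then 0 else idx + 1) ≤ idx
            then idx - (if idx + 1 = n then 0 else idx + 1)
            else idx + n - (if idx + 1 = n then 0 else idx + 1)) = n - 1 := by
        split_ifs <;> omega
      rw [harg]
      rfl
    · rw [if_neg he, List.nil_append]
      have hD : ∃ m : Nat, (if idx ≤ i then i - idx else i + n - idx) = m + 1 := by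
        by_cases hle : idx ≤ i
        · exact ⟨i - idx - 1, by rw [if_pos hle]; omega⟩
        · exact ⟨i + n - idx - 1, by rw [if_neg hle]; omega⟩
      obtain ⟨m, hm⟩ := hD
      rw [hm]
      rw [show takeStride (c :: cs) (m + 1) n = takeStride cs m n from rfl]
      have harg : (if (if idx + 1 = n then 0 else idx + 1) ≤ i
            then i - (if idx + 1 = n then 0 else idx + 1)
            else i + n - (if idx + 1 = n then 0 else idx + 1)) = m := by
        split_ifs at hm ⊢ <;> omega
      rw [harg]

-- ===== VERDICT (by name: the statement is the Claim_ definition above) =====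
theorem split_codes_equally_spec : Claim_equal_split_codes_equally := by
  intro codes chunks _ hpre
  unfold Spec_split_codes_equally
  by_cases hc : 1 ≤ chunks
  · obtain ⟨n, rfl⟩ : ∃ n : Nat, chunks = (n : Int) :=
      ⟨chunks.toNat, (Int.toNat_of_nonneg (by omega)).symm⟩
    have hn : 1 ≤ n := by exact_mod_cast hc
    dsimp only [split_codes_equally, split_codes_equally_alt]
    have hfold := foldl_rr (n : Int) n rfl hn codes
      ((PySem.List.pyRange 0 (n : Int) 1).map (fun _ => PySem.Dict.empty)) 0 hn
    rw [show (((0 : Nat) : Int)) = (0 : Int) by simp] at hfold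
    rw [hfold]
    apply List.ext_getElem
    · simp [PySem.List.length_pyRange_one]
    · intro i h1 h2
      have hi : i < n := by
        simpa [PySem.List.length_pyRange_one] using h1
      simp only [List.getElem_map, List.getElem_mapIdx, PySem.List.getElem_pyRange_one]
      rw [show (0 : Int) + (i : Int) = (i : Int) by ring]
      rw [slice?_stride codes (i : Int) (n : Int) (by positivity) hc]
      simp only [Option.getD_some, Int.toNat_natCast]
      rw [strideFrom_eq_takeStride n hn codes 0 i (by omega) hi]
      simp only [Nat.zero_le, if_pos, Nat.sub_zero]
      rfl
  · have hcodes : codes = [] := by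
      rcases hpre with h | h
      · exact h
      · omega
    subst hcodes
    simp [split_codes_equally, split_codes_equally_alt,
      PySem.List.pyRange_one_eq_nil (by omega : (0:Int) ≥ chunks)]
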